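-- pv_equiv track=rewrite | github.com/gml4tdm/graph-learning-for-source-code-analysis | plotting/plotting.py | _split_outer
-- ===== SOURCE A (Python) =====
-- def _split_outer(s: str) -> list[str]:
--     opened = 0
--     points = []
--     for index, char in enumerate(s):
--         if char == '{':
--             opened += 1
--         elif char == '}':
--             opened -= 1
--         #if opened == 0 and char == '/':
--         #    break
--         if opened == 0 and char == ',':
--             points.append(index)
--     # Split in all collected indices
--     result = []
--     offset = 0
--     for point in points:
--         result.append(s[offset:point])
--         offset = point + 1
--     result.append(s[offset:])
--     return result
-- ===== SOURCE B (Python) =====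
-- def _split_outer(s: str) -> list[str]:
--     result = []
--     buf = []
--     opened = 0
--     for char in s:
--         if char == '{':
--             opened += 1
--             buf.append(char)
--         elif char == '}':
--             opened -= 1
--             buf.append(char)
--         elif char == ',' and opened == 0:
--             result.append(''.join(buf))
--             buf = []
--         else:
--             buf.append(char)
--     result.append(''.join(buf))
--     return result
-- ===== Notes on version B (the rewrite author's own statement) =====
-- stated objective: alternative
-- what changed: Replaces A's two-phase collect-comma-indices-then-slice structure with a single fused pass that accumulates the current segment in a character buffer and flushes it at each top-level comma.
import Mathlib
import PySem

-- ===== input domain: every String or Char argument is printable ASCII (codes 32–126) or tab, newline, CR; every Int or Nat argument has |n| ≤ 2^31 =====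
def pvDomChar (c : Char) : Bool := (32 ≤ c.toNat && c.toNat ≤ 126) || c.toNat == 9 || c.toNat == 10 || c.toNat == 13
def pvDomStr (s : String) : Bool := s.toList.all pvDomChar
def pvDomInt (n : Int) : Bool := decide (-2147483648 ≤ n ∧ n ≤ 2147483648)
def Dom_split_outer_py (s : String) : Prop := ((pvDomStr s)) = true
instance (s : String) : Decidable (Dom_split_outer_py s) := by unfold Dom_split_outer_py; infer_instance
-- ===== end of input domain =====

-- B replaces A's two-phase collect-comma-indices-then-slice structure with one fused pass
-- that accumulates the current segment in a character buffer (objective: alternative decomposition).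

-- ===== PORT A =====
-- literal transliteration: first loop collects indices of top-level commas, second loop slices
def split_outer_py (s : String) : List String :=
  let cs := s.toList
  let st := (PySem.List.enumerate cs 0).foldl
    (fun (p : Int × List Int) ic =>
      let opened := if ic.2 = '{' then p.1 + 1 else if ic.2 = '}' then p.1 - 1 else p.1
      (opened, if opened = 0 ∧ ic.2 = ',' then p.2 ++ [ic.1] else p.2)) ((0 : Int), ([] : List Int))
  let fin := st.2.foldl
    (fun (q : List String × Int) point =>
      (q.1 ++ [String.mk (PySem.List.slice cs (some q.2) (some point))], point + 1))
    (([] : List String), (0 : Int))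
  fin.1 ++ [String.mk (PySem.List.slice cs (some fin.2) none)]

-- ===== PORT B =====
-- literal transliteration of Source B: one pass keeping (opened, buf, result)
def altLoop : List Char → Int → List Char → List String → List String
  | [], _, buf, result => result ++ [String.mk buf]
  | c :: t, opened, buf, result =>
    if c = '{' then altLoop t (opened + 1) (buf ++ [c]) result
    else if c = '}' then altLoop t (opened - 1) (buf ++ [c]) result
    else if c = ',' ∧ opened = 0 then altLoop t opened [] (result ++ [String.mk buf])
    else altLoop t opened (buf ++ [c]) result

def split_outer_py_alt (s : String) : List String :=
  altLoop s.toList 0 [] []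

-- ===== PRECONDITION & SPEC =====
def Spec_split_outer_py (s : String) (out : List String) : Prop := out = split_outer_py_alt s
instance (s : String) (out : List String) : Decidable (Spec_split_outer_py s out) := by unfold Spec_split_outer_py; infer_instance

-- ===== CLAIM (what is proved, stated in full; the proofs are below) =====
def Claim_equal_split_outer_py : Prop := ∀ (s : String), Dom_split_outer_py s → Spec_split_outer_py s (split_outer_py s)

-- ===== LEMMAS AND PROOFS =====

/-- depth update performed by both loops -/
def updD (d : Int) (c : Char) : Int := if c = '{' then d + 1 else if c = '}' then d - 1 else d

/-- relative positions (from the start of the list) of top-level commas -/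
def pts (d : Int) : List Char → List Nat
  | [] => []
  | c :: t =>
    let d' := updD d c
    if d' = 0 ∧ c = ',' then 0 :: (pts d' t).map (· + 1) else (pts d' t).map (· + 1)

/-- prepend a char to the first block -/
def consHead (c : Char) : List (List Char) → List (List Char)
  | [] => [[c]]
  | h :: r => (c :: h) :: r

/-- the segments as a direct recursion -/
def segs (d : Int) : List Char → List (List Char)
  | [] => [[]]
  | c :: t =>
    let d' := updD d c
    if d' = 0 ∧ c = ',' then [] :: segs d' t else consHead c (segs d' t)

/-- splitting a list at an (increasing) list of cut positions -/
def chop (cs : List Char) : Nat → List Nat → List (List Char)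
  | off, [] => [cs.drop off]
  | off, p :: ps => ((cs.drop off).take (p - off)) :: chop cs (p + 1) ps

/-- B's result: first block glued onto the pending buffer -/
def glue (buf : List Char) : List (List Char) → List String
  | [] => []
  | h :: r => String.mk (buf ++ h) :: r.map String.mk

theorem segs_ne_nil (d : Int) (l : List Char) : segs d l ≠ [] := by
  cases l with
  | nil => simp [segs]
  | cons c t =>
    simp only [segs]
    split
    · simp
    · cases h : segs (updD d c) t <;> simp [consHead]

theorem altLoop_eq (l : List Char) : ∀ (d : Int) (buf : List Char) (acc : List String),
    altLoop l d buf acc = acc ++ glue buf (segs d l) := by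
  induction l with
  | nil => intro d buf acc; simp [altLoop, segs, glue]
  | cons c t ih =>
    intro d buf acc
    by_cases h1 : c = '{'
    · subst h1
      simp only [altLoop, segs, updD]
      simp only [reduceIte, Char.reduceEq, and_false, if_false]
      rw [ih]
      congr 1
      obtain ⟨h, r, hr⟩ : ∃ h r, segs (d + 1) t = h :: r := by
        cases hs : segs (d + 1) t with
        | nil => exact absurd hs (segs_ne_nil _ _)
        | cons h r => exact ⟨h, r, rfl⟩
      simp [hr, consHead, glue]
    · by_cases h2 : c = '}'
      · subst h2
        simp only [altLoop, segs, updD]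
        simp only [reduceIte, Char.reduceEq, and_false, if_false]
        rw [ih]
        congr 1
        obtain ⟨h, r, hr⟩ : ∃ h r, segs (d - 1) t = h :: r := by
          cases hs : segs (d - 1) t with
          | nil => exact absurd hs (segs_ne_nil _ _)
          | cons h r => exact ⟨h, r, rfl⟩
        simp [hr, consHead, glue]
      · by_cases h3 : c = ',' ∧ d = 0
        · obtain ⟨hc, hd⟩ := h3
          subst hc; subst hd
          simp only [altLoop, segs, updD]
          simp only [Char.reduceEq, and_self, if_true, if_false]
          rw [ih]
          obtain ⟨h, r, hr⟩ : ∃ h r, segs (0 : Int) t = h :: r := by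
            cases hs : segs (0 : Int) t with
            | nil => exact absurd hs (segs_ne_nil _ _)
            | cons h r => exact ⟨h, r, rfl⟩
          simp [hr, glue, List.append_assoc]
        · simp only [altLoop, segs, updD]
          rw [if_neg h1, if_neg h2, if_neg h3]
          rw [if_neg h1, if_neg h2,
              if_neg (by intro hc; exact h3 ⟨hc.2, hc.1⟩ : ¬ (d = 0 ∧ c = ','))]
          rw [ih]
          congr 1
          obtain ⟨h, r, hr⟩ : ∃ h r, segs d t = h :: r := by
            cases hs : segs d t with
            | nil => exact absurd hs (segs_ne_nil _ _)
            | cons h r => exact ⟨h, r, rfl⟩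
          simp [hr, consHead, glue]

theorem glue_nil_eq (L : List (List Char)) (hL : L ≠ []) : glue [] L = L.map String.mk := by
  cases L with
  | nil => simp at hL
  | cons h r => simp [glue]

theorem alt_eq_segs (s : String) :
    split_outer_py_alt s = (segs 0 s.toList).map String.mk := by
  rw [split_outer_py_alt, altLoop_eq, glue_nil_eq _ (segs_ne_nil _ _)]
  simp

theorem foldl_pts (l : List Char) : ∀ (n d : Int) (ps : List Int),
    ((PySem.List.enumerate l n).foldl
      (fun (p : Int × List Int) ic =>
        let opened := if ic.2 = '{' then p.1 + 1 else if ic.2 = '}' then p.1 - 1 else p.1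
        (opened, if opened = 0 ∧ ic.2 = ',' then p.2 ++ [ic.1] else p.2)) (d, ps)).2
    = ps ++ (pts d l).map (fun k : Nat => n + (k : Int)) := by
  induction l with
  | nil => intro n d ps; simp [PySem.List.enumerate_nil, pts]
  | cons c t ih =>
    intro n d ps
    rw [PySem.List.enumerate_cons]
    simp only [List.foldl_cons]
    rw [ih]
    simp only [pts]
    have hupd : (if c = '{' then d + 1 else if c = '}' then d - 1 else d) = updD d c := rfl
    by_cases hc : updD d c = 0 ∧ c = ','
    · rw [if_pos hc]
      simp only [hupd, if_pos hc]
      simp only [List.map_cons, List.map_map, Function.comp_def, List.append_assoc]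
      simp only [Nat.cast_zero, add_zero, List.cons_append, List.nil_append]
      congr 1
      congr 1
      apply List.map_congr_left; intro k _; push_cast; ring
    · rw [if_neg hc]
      simp only [hupd, if_neg hc]
      congr 1
      simp only [List.map_map, Function.comp_def]
      apply List.map_congr_left; intro k _; push_cast; ring

theorem foldl_chop (cs : List Char) (ps : List Nat) : ∀ (acc : List String) (off : Nat),
    ((ps.map (fun k : Nat => (k : Int))).foldl
      (fun (q : List String × Int) point =>
        (q.1 ++ [String.mk (PySem.List.slice cs (some q.2) (some point))], point + 1))
      (acc, ((off : Nat) : Int))).1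
    ++ [String.mk (PySem.List.slice cs
          (some ((ps.map (fun k : Nat => (k : Int))).foldl
            (fun (q : List String × Int) point =>
              (q.1 ++ [String.mk (PySem.List.slice cs (some q.2) (some point))], point + 1))
            (acc, ((off : Nat) : Int))).2) none)]
    = acc ++ (chop cs off ps).map String.mk := by
  induction ps with
  | nil =>
    intro acc off
    simp [chop, PySem.List.slice_from_natCast]
  | cons p ps ih =>
    intro acc off
    simp only [List.map_cons, List.foldl_cons]
    have hcast : ((p : Int) + 1) = (((p + 1 : Nat) : Int)) := by push_cast; ring
    rw [hcast]
    rw [ih (acc ++ [String.mk (PySem.List.slice cs (some ((off : Nat) : Int)) (some (p : Int)))]) (p + 1)]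
    simp [chop, PySem.List.slice_natCast, List.append_assoc]

theorem chop_shift (c : Char) (t : List Char) (ps : List Nat) : ∀ (q : Nat),
    chop (c :: t) (q + 1) (ps.map (· + 1)) = chop t q ps := by
  induction ps with
  | nil => intro q; simp [chop]
  | cons p ps ih =>
    intro q
    simp only [List.map_cons, chop, List.drop_succ_cons]
    have h : p + 1 - (q + 1) = p - q := by omega
    rw [h, ih (p + 1)]

theorem chop_consHead (c : Char) (t : List Char) (ps : List Nat) :
    chop (c :: t) 0 (ps.map (· + 1)) = consHead c (chop t 0 ps) := by
  cases ps with
  | nil => simp [chop, consHead]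
  | cons p ps =>
    simp only [List.map_cons, chop, consHead, List.drop_zero, Nat.sub_zero]
    rw [chop_shift]
    congr 1

theorem chop_pts (l : List Char) : ∀ (d : Int), chop l 0 (pts d l) = segs d l := by
  induction l with
  | nil => intro d; simp [pts, chop, segs]
  | cons c t ih =>
    intro d
    simp only [pts, segs]
    by_cases hc : updD d c = 0 ∧ c = ','
    · rw [if_pos hc, if_pos hc]
      simp only [chop, List.drop_zero, Nat.zero_add]
      rw [chop_shift c t (pts (updD d c) t) 0, ih]
      simp
    · rw [if_neg hc, if_neg hc, chop_consHead, ih]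

theorem a_eq_segs (s : String) :
    split_outer_py s = (segs 0 s.toList).map String.mk := by
  rw [split_outer_py]
  simp only
  rw [foldl_pts]
  have h1 : (pts 0 s.toList).map (fun k : Nat => (0 : Int) + (k : Int))
          = (pts 0 s.toList).map (fun k : Nat => (k : Int)) := by
    apply List.map_congr_left; intro k _; ring
  rw [List.nil_append, h1]
  have h2 := foldl_chop s.toList (pts 0 s.toList) [] 0
  simp only [Nat.cast_zero] at h2
  rw [h2, List.nil_append, chop_pts]

-- ===== VERDICT (by name: the statement is the Claim_ definition above) =====
theorem split_outer_py_spec : Claim_equal_split_outer_py := by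
  intro s _
  unfold Spec_split_outer_py
  rw [a_eq_segs, alt_eq_segs]
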